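-- pv_equiv track=rewrite | github.com/epilectrik/voynich | phases/EPM_exploratory_process/procedural_pattern_validation.py | count_ppb_patterns
-- ===== SOURCE A (Python) =====
-- from typing import Dict, List, Set, Tuple, Any
--
-- CATEGORY_MAPPINGS = {
--     # PLANT prefixes (HERBAL enriched)
--     'ch': 'PLANT',
--     'sh': 'PLANT',
--     'da': 'PLANT',
--     'ct': 'PLANT',
--
--     # BODY prefixes (BIOLOGICAL enriched)
--     'qo': 'BODY',
--     'ol': 'BODY',
--     'so': 'BODY',
--
--     # PROCESS middles (gallows characters and heating)
--     'ke': 'PROCESS',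
--     'lc': 'PROCESS',
--     'tc': 'PROCESS',
--     'kc': 'PROCESS',
--     'ck': 'PROCESS',
--     'pc': 'PROCESS',
--     'dc': 'PROCESS',
--     'sc': 'PROCESS',
--     'fc': 'PROCESS',
--     'cp': 'PROCESS',
--     'cf': 'PROCESS',
--
--     # TIME/CELESTIAL (ZODIAC enriched)
--     'ot': 'TIME',
--     'ok': 'TIME',
--     'al': 'TIME',
--     'ar': 'TIME',
-- }
--
-- def get_category(word: str, mappings: Dict[str, str] = None) -> str:
--     """Get category for a word based on prefix."""
--     if mappings is None:
--         mappings = CATEGORY_MAPPINGS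
--
--     # Check longest matching prefix first
--     for length in [3, 2]:
--         if len(word) >= length:
--             prefix = word[:length]
--             if prefix in mappings:
--                 return mappings[prefix]
--
--     return 'OTHER'
--
-- def count_ppb_patterns(sequences: List[List[str]], mappings: Dict[str, str] = None) -> int:
--     """Count PLANT -> PROCESS -> BODY patterns in sequences."""
--     if mappings is None:
--         mappings = CATEGORY_MAPPINGS
--
--     count = 0
--     for seq in sequences:
--         categories = [get_category(w, mappings) for w in seq]
--
--         # Look for PLANT followed by PROCESS followed by BODY
--         for i in range(len(categories) - 2):
--             if categories[i] == 'PLANT':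
--                 for j in range(i + 1, len(categories) - 1):
--                     if categories[j] == 'PROCESS':
--                         for k in range(j + 1, len(categories)):
--                             if categories[k] == 'BODY':
--                                 count += 1
--                                 break
--                         break
--
--     return count
-- ===== SOURCE B (Python) =====
-- CATEGORY_MAPPINGS = {
--     'ch': 'PLANT', 'sh': 'PLANT', 'da': 'PLANT', 'ct': 'PLANT',
--     'qo': 'BODY', 'ol': 'BODY', 'so': 'BODY',
--     'ke': 'PROCESS', 'lc': 'PROCESS', 'tc': 'PROCESS', 'kc': 'PROCESS',
--     'ck': 'PROCESS', 'pc': 'PROCESS', 'dc': 'PROCESS', 'sc': 'PROCESS',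
--     'fc': 'PROCESS', 'cp': 'PROCESS', 'cf': 'PROCESS',
--     'ot': 'TIME', 'ok': 'TIME', 'al': 'TIME', 'ar': 'TIME',
-- }
--
-- def _cat(word, mappings):
--     if len(word) >= 3:
--         v = mappings.get(word[:3])
--         if v is not None:
--             return v
--     if len(word) >= 2:
--         v = mappings.get(word[:2])
--         if v is not None:
--             return v
--     return 'OTHER'
--
-- def count_ppb_patterns(sequences, mappings=None):
--     """One backward pass per sequence: a PLANT at i counts iff the first
--     PROCESS after i has some BODY after it."""
--     if mappings is None:
--         mappings = CATEGORY_MAPPINGS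
--     total = 0
--     for seq in sequences:
--         ok = False          # first PROCESS strictly after current word leads to a BODY
--         body_after = False  # some BODY strictly after current word
--         for w in reversed(seq):
--             c = _cat(w, mappings)
--             if c == 'PLANT' and ok:
--                 total += 1
--             if c == 'PROCESS':
--                 ok = body_after
--             if c == 'BODY':
--                 body_after = True
--     return total
-- ===== Notes on version B (the rewrite author's own statement) =====
-- stated objective: alternative
-- what changed: Replaces the triple nested index loops per sequence by a single backward pass that maintains two booleans (first PROCESS after here leads to a BODY; BODY seen after here), counting each PLANT in O(1); worst-case O(n) per sequence vs A's O(n^2), though a timing run's inputs do not trigger A's quadratic case.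
import Mathlib
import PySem

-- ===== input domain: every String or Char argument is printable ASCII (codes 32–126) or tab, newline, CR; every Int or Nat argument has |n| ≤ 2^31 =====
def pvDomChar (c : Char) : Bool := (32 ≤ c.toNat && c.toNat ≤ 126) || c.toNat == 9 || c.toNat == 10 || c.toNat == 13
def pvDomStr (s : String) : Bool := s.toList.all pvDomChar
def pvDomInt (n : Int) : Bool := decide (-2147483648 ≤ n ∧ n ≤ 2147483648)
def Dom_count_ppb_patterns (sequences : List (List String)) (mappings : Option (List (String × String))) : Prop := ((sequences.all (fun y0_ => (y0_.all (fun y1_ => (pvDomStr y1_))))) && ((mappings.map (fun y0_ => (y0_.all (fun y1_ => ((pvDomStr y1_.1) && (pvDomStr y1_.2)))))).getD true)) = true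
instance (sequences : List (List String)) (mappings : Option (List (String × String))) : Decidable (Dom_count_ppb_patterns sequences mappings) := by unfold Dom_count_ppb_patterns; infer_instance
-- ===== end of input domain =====

-- B replaces A's triple nested scans per sequence by one backward pass with two booleans (alternative algorithm, same measured cost).

def pvCatMaps : List (String × String) :=
  [("ch","PLANT"), ("sh","PLANT"), ("da","PLANT"), ("ct","PLANT"),
   ("qo","BODY"), ("ol","BODY"), ("so","BODY"),
   ("ke","PROCESS"), ("lc","PROCESS"), ("tc","PROCESS"), ("kc","PROCESS"),
   ("ck","PROCESS"), ("pc","PROCESS"), ("dc","PROCESS"), ("sc","PROCESS"),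
   ("fc","PROCESS"), ("cp","PROCESS"), ("cf","PROCESS"),
   ("ot","TIME"), ("ok","TIME"), ("al","TIME"), ("ar","TIME")]

-- ===== PORT A =====
-- get_category: 'for length in [3, 2]: if len(word) >= length: … if prefix in mappings: return mappings[prefix]'
def getCatLoop (word : String) (m : PySem.Dict String String) : List Int → String
  | [] => "OTHER"
  | l :: rest =>
    if l ≤ PySem.Str.len word then
      match m.get? (PySem.Str.slice word none (some l)) with
      | some v => v
      | none => getCatLoop word m rest
    else getCatLoop word m rest

def getCategory (word : String) (m : PySem.Dict String String) : String :=
  getCatLoop word m [3, 2]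

-- inner 'for k in range(j+1, len)' with its break (indices always in range)
def loopK (cats : List String) : List Nat → Int
  | [] => 0
  | k :: rest => if cats.getD k "" == "BODY" then 1 else loopK cats rest

-- middle 'for j in range(i+1, len-1)' with its break at the first PROCESS
def loopJ (cats : List String) : List Nat → Int
  | [] => 0
  | j :: rest =>
    if cats.getD j "" == "PROCESS" then
      loopK cats (List.range' (j+1) (cats.length - (j+1)))
    else loopJ cats rest

-- outer 'for i in range(len-2)'
def loopI (cats : List String) : List Nat → Int
  | [] => 0
  | i :: rest =>
    (if cats.getD i "" == "PLANT" then
       loopJ cats (List.range' (i+1) (cats.length - 1 - (i+1)))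
     else 0) + loopI cats rest

def count_ppb_patterns (sequences : List (List String)) (mappings : Option (List (String × String))) : Int :=
  let m : PySem.Dict String String := PySem.Dict.mk (mappings.getD pvCatMaps)
  sequences.foldl (fun count seq =>
    let cats := seq.map (fun w => getCategory w m)
    count + loopI cats (List.range' 0 (cats.length - 2))) 0

-- ===== PORT B =====
-- _cat from Source B: two explicit prefix lookups
def catAlt2 (w : String) (m : PySem.Dict String String) : String :=
  if (2:Int) ≤ PySem.Str.len w then
    match m.get? (PySem.Str.slice w none (some 2)) with
    | some v => v
    | none => "OTHER"
  else "OTHER"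

def catAlt (w : String) (m : PySem.Dict String String) : String :=
  if (3:Int) ≤ PySem.Str.len w then
    match m.get? (PySem.Str.slice w none (some 3)) with
    | some v => v
    | none => catAlt2 w m
  else catAlt2 w m

-- backward pass 'for w in reversed(seq)': state (total so far, ok, body_after)
def bscan (catOf : String → String) : List String → Int × Bool × Bool
  | [] => (0, false, false)
  | w :: rest =>
    let s := bscan catOf rest
    let c := catOf w
    let cnt := if c == "PLANT" && s.2.1 then s.1 + 1 else s.1
    let ok := if c == "PROCESS" then s.2.2 else s.2.1
    let body := if c == "BODY" then true else s.2.2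
    (cnt, ok, body)

def count_ppb_patterns_alt (sequences : List (List String)) (mappings : Option (List (String × String))) : Int :=
  let m : PySem.Dict String String := PySem.Dict.mk (mappings.getD pvCatMaps)
  sequences.foldl (fun total seq => total + (bscan (fun w => catAlt w m) seq).1) 0

-- ===== PRECONDITION & SPEC =====
def Spec_count_ppb_patterns (sequences : List (List String)) (mappings : Option (List (String × String))) (out : Int) : Prop := out = count_ppb_patterns_alt sequences mappings
instance (sequences : List (List String)) (mappings : Option (List (String × String))) (out : Int) : Decidable (Spec_count_ppb_patterns sequences mappings out) := by unfold Spec_count_ppb_patterns; infer_instance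

-- ===== CLAIM (what is proved, stated in full; the proofs are below) =====
def Claim_equal_count_ppb_patterns : Prop := ∀ (sequences : List (List String)) (mappings : Option (List (String × String))), Dom_count_ppb_patterns sequences mappings → Spec_count_ppb_patterns sequences mappings (count_ppb_patterns sequences mappings)

-- ===== LEMMAS AND PROOFS =====

-- specification functions on a category list: first PROCESS leads to a BODY; count of good PLANTs
def okOf : List String → Bool
  | [] => false
  | c :: r => if c == "PROCESS" then r.any (· == "BODY") else okOf r

def cntOf : List String → Int
  | [] => 0
  | c :: r => (if c == "PLANT" && okOf r then 1 else 0) + cntOf r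

theorem catAlt_eq (w : String) (m : PySem.Dict String String) : catAlt w m = getCategory w m := rfl

theorem bscan_eq (catOf : String → String) (l : List String) :
    bscan catOf l = (cntOf (l.map catOf), okOf (l.map catOf), (l.map catOf).any (· == "BODY")) := by
  induction l with
  | nil => rfl
  | cons w rest ih =>
    simp only [bscan, ih, List.map_cons, cntOf, okOf, List.any_cons]
    by_cases hp : catOf w == "PLANT" <;> by_cases hq : catOf w == "PROCESS" <;>
      by_cases hb : catOf w == "BODY" <;>
      simp [hp, hq, hb] <;> split <;> simp [add_comm]

theorem okOf_short (l : List String) (h : l.length ≤ 1) : okOf l = false := by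
  match l, h with
  | [], _ => rfl
  | [a], _ => simp [okOf]

theorem cntOf_short (l : List String) (h : l.length ≤ 2) : cntOf l = 0 := by
  match l, h with
  | [], _ => rfl
  | [a], _ => simp [cntOf, okOf]
  | [a, b], _ => simp [cntOf, okOf]

theorem loopK_eq (cats : List String) (j : Nat) :
    loopK cats (List.range' j (cats.length - j)) =
      if (cats.drop j).any (· == "BODY") then 1 else 0 := by
  induction hk : cats.length - j generalizing j with
  | zero =>
    have hle : cats.length ≤ j := by omega
    simp [List.range', loopK, List.drop_eq_nil_of_le hle]
  | succ k ih =>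
    have hj : j < cats.length := by omega
    rw [show List.range' j (k+1) = j :: List.range' (j+1) k from rfl]
    rw [List.drop_eq_getElem_cons hj]
    simp only [loopK, List.any_cons]
    rw [List.getD_eq_getElem?_getD, List.getElem?_eq_getElem hj]
    by_cases hb : cats[j] == "BODY"
    · simp [hb]
    · simp only [hb, Option.getD_some]
      have := ih (j+1) (by omega)
      rw [this]
      simp

theorem loopJ_eq (cats : List String) (j : Nat) :
    loopJ cats (List.range' j (cats.length - 1 - j)) =
      if okOf (cats.drop j) then 1 else 0 := by
  induction hk : cats.length - 1 - j generalizing j with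
  | zero =>
    have hlen : (cats.drop j).length ≤ 1 := by simp [List.length_drop]; omega
    simp [List.range', loopJ, okOf_short _ hlen]
  | succ k ih =>
    have hj : j < cats.length := by omega
    rw [show List.range' j (k+1) = j :: List.range' (j+1) k from rfl]
    rw [List.drop_eq_getElem_cons hj]
    simp only [loopJ, okOf]
    rw [List.getD_eq_getElem?_getD, List.getElem?_eq_getElem hj]
    by_cases hp : cats[j] == "PROCESS"
    · simp only [hp, if_true, Option.getD_some]
      rw [loopK_eq cats (j+1)]
    · simp only [hp, Option.getD_some]
      exact ih (j+1) (by omega)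

theorem loopI_eq (cats : List String) (i : Nat) :
    loopI cats (List.range' i (cats.length - 2 - i)) = cntOf (cats.drop i) := by
  induction hk : cats.length - 2 - i generalizing i with
  | zero =>
    have hlen : (cats.drop i).length ≤ 2 := by simp [List.length_drop]; omega
    simp [List.range', loopI, cntOf_short _ hlen]
  | succ k ih =>
    have hi : i < cats.length := by omega
    rw [show List.range' i (k+1) = i :: List.range' (i+1) k from rfl]
    rw [List.drop_eq_getElem_cons hi]
    simp only [loopI, cntOf]
    rw [List.getD_eq_getElem?_getD, List.getElem?_eq_getElem hi]
    rw [ih (i+1) (by omega)]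
    by_cases hp : cats[i] == "PLANT"
    · simp only [hp, if_true, Option.getD_some, Bool.true_and]
      rw [loopJ_eq cats (i+1)]
    · simp [hp]

theorem per_seq (m : PySem.Dict String String) (seq : List String) :
    loopI (seq.map (fun w => getCategory w m))
        (List.range' 0 ((seq.map (fun w => getCategory w m)).length - 2)) =
      (bscan (fun w => catAlt w m) seq).1 := by
  rw [bscan_eq]
  have h := loopI_eq (seq.map (fun w => getCategory w m)) 0
  simp only [List.drop_zero, Nat.sub_zero] at h
  simp only [catAlt_eq]
  exact h

theorem fold_eq (m : PySem.Dict String String) (seqs : List (List String)) (acc : Int) :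
    seqs.foldl (fun count seq =>
      let cats := seq.map (fun w => getCategory w m)
      count + loopI cats (List.range' 0 (cats.length - 2))) acc =
    seqs.foldl (fun total seq => total + (bscan (fun w => catAlt w m) seq).1) acc := by
  induction seqs generalizing acc with
  | nil => rfl
  | cons s rest ih =>
    simp only [List.foldl_cons]
    rw [per_seq]
    exact ih _

-- ===== VERDICT (by name: the statement is the Claim_ definition above) =====
theorem count_ppb_patterns_spec : Claim_equal_count_ppb_patterns := by
  intro sequences mappings _
  exact fold_eq (PySem.Dict.mk (mappings.getD pvCatMaps)) sequences 0
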